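-- pv_equiv track=rewrite | github.com/pypi-data/pypi-mirror-275 | packages/number2text/number2text-0.0.1-py3-none-any.whl/number2text/lang/ha.py | convert_less_than_thousand
-- ===== SOURCE A (Python) =====
-- _ones= ["", "ɗaya", "biyu", "uku", "huɗu", "biyar", "shida", "bakwai", "takwas", "tara"]
--
-- _teens = ["goma", "goma sha ɗaya", "goma sha biyu", "goma sha uku", "goma sha huɗu", "goma sha biyar", "goma sha shida", "goma sha bakwai", "goma sha takwas", "goma sha tara"]
--
-- _tens = ["", "", "ashirin", "talatin", "arba'in", "hamsin", "sittin", "saba'in", "tamanin", "tis'in"]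
--
-- _hundreds = ["", "ɗari", "ɗari biyu", "ɗari uku", "ɗari huɗu", "ɗari biyar", "ɗari shida", "ɗari bakwai", "ɗari takwas", "ɗari tara"]
--
-- def convert_less_than_thousand(number):
--     if number < 10:
--         return _ones[number]
--     elif number < 20:
--         return _teens[number - 10]
--     elif number < 100:
--         tens, ones = divmod(number, 10)
--         if ones == 0:
--             return _tens[tens]
--         else:
--             return _tens[tens] + " da " + _ones[ones]
--     else:
--         hundreds, less_than_hundred = divmod(number, 100)
--         if less_than_hundred == 0:
--             return _hundreds[hundreds]
--         else:
--             return _hundreds[hundreds] + " da " + convert_less_than_thousand(less_than_hundred)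
-- ===== SOURCE B (Python) =====
-- _ones= ["", "ɗaya", "biyu", "uku", "huɗu", "biyar", "shida", "bakwai", "takwas", "tara"]
--
-- _teens = ["goma", "goma sha ɗaya", "goma sha biyu", "goma sha uku", "goma sha huɗu", "goma sha biyar", "goma sha shida", "goma sha bakwai", "goma sha takwas", "goma sha tara"]
--
-- _tens = ["", "", "ashirin", "talatin", "arba'in", "hamsin", "sittin", "saba'in", "tamanin", "tis'in"]
--
-- _hundreds = ["", "ɗari", "ɗari biyu", "ɗari uku", "ɗari huɗu", "ɗari biyar", "ɗari shida", "ɗari bakwai", "ɗari takwas", "ɗari tara"]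
--
-- def convert_less_than_thousand(number):
--     if number < 10:
--         return _ones[number]
--     if number < 20:
--         return _teens[number - 10]
--     hundreds, rem = divmod(number, 100)
--     parts = []
--     if hundreds:
--         parts.append(_hundreds[hundreds])
--     if rem >= 20:
--         t, o = divmod(rem, 10)
--         parts.append(_tens[t])
--         if o:
--             parts.append(_ones[o])
--     elif rem >= 10:
--         parts.append(_teens[rem - 10])
--     elif rem:
--         parts.append(_ones[rem])
--     return " da ".join(parts)
-- ===== Notes on version B (the rewrite author's own statement) =====
-- stated objective: simpler
-- what changed: Replaces A's recursion (hundreds word + recursive call on the remainder) and its per-range return expressions with one flat pass that collects the components (hundreds word, then a classified remainder word or two) into a list and joins them with ' da '.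
import Mathlib
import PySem

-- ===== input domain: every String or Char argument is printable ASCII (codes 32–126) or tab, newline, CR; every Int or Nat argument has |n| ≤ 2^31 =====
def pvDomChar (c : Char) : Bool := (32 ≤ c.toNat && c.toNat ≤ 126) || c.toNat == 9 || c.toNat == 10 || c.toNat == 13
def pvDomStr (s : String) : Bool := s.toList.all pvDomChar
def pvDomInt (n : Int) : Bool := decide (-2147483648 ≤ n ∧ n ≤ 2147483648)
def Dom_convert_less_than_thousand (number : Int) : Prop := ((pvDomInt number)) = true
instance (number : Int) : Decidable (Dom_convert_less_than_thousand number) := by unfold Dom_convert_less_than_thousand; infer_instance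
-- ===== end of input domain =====

-- B replaces A's tail recursion with a flat component-assembly pass (hundreds word,
-- then a classified remainder) joined by " da " — objective: simpler decomposition.

-- ===== PORT A =====
def pvOnes : List String := ["", "ɗaya", "biyu", "uku", "huɗu", "biyar", "shida", "bakwai", "takwas", "tara"]
def pvTeens : List String := ["goma", "goma sha ɗaya", "goma sha biyu", "goma sha uku", "goma sha huɗu", "goma sha biyar", "goma sha shida", "goma sha bakwai", "goma sha takwas", "goma sha tara"]
def pvTens : List String := ["", "", "ashirin", "talatin", "arba'in", "hamsin", "sittin", "saba'in", "tamanin", "tis'in"]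
def pvHundreds : List String := ["", "ɗari", "ɗari biyu", "ɗari uku", "ɗari huɗu", "ɗari biyar", "ɗari shida", "ɗari bakwai", "ɗari takwas", "ɗari tara"]

-- literal transliteration of A; the list indexings raise outside Pre_, excluded there
def convert_less_than_thousand (number : Int) : String :=
  if _h1 : number < 10 then
    PySem.List.pyGetD pvOnes number ""
  else if _h2 : number < 20 then
    PySem.List.pyGetD pvTeens (number - 10) ""
  else if _h3 : number < 100 then
    let tens := PySem.Int.floordiv number 10
    let ones := PySem.Int.mod number 10
    if ones = 0 then PySem.List.pyGetD pvTens tens ""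
    else PySem.List.pyGetD pvTens tens "" ++ " da " ++ PySem.List.pyGetD pvOnes ones ""
  else
    let hundreds := PySem.Int.floordiv number 100
    let less_than_hundred := PySem.Int.mod number 100
    if less_than_hundred = 0 then PySem.List.pyGetD pvHundreds hundreds ""
    else PySem.List.pyGetD pvHundreds hundreds "" ++ " da " ++ convert_less_than_thousand less_than_hundred
termination_by number.toNat
decreasing_by
  have h : PySem.Int.mod number 100 = number % 100 := PySem.Int.mod_eq_emod_of_pos (by omega)
  simp only [h]
  omega

-- ===== PORT B =====
-- the remainder-classification appends of Source B (the if/elif chain on rem)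
def pvRemParts (rem : Int) : List String :=
  if rem ≥ 20 then
    let t := PySem.Int.floordiv rem 10
    let o := PySem.Int.mod rem 10
    [PySem.List.pyGetD pvTens t ""] ++ (if o ≠ 0 then [PySem.List.pyGetD pvOnes o ""] else [])
  else if rem ≥ 10 then
    [PySem.List.pyGetD pvTeens (rem - 10) ""]
  else if rem ≠ 0 then
    [PySem.List.pyGetD pvOnes rem ""]
  else []

def convert_less_than_thousand_alt (number : Int) : String :=
  if number < 10 then
    PySem.List.pyGetD pvOnes number ""
  else if number < 20 then
    PySem.List.pyGetD pvTeens (number - 10) ""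
  else
    let hundreds := PySem.Int.floordiv number 100
    let rem := PySem.Int.mod number 100
    let parts : List String :=
      (if hundreds ≠ 0 then [PySem.List.pyGetD pvHundreds hundreds ""] else []) ++ pvRemParts rem
    PySem.Str.join " da " parts

-- ===== PRECONDITION & SPEC =====
-- Pre_ excludes exactly the inputs where A raises IndexError: number < -10 (ones
-- lookup past the left end) and number ≥ 1000 (hundreds index ≥ 10).
def Pre_convert_less_than_thousand (number : Int) : Prop := -10 ≤ number ∧ number < 1000
instance (number : Int) : Decidable (Pre_convert_less_than_thousand number) := by unfold Pre_convert_less_than_thousand; infer_instance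
def pvWitness_convert_less_than_thousand : Int := (123)

def Spec_convert_less_than_thousand (number : Int) (out : String) : Prop := out = convert_less_than_thousand_alt number
instance (number : Int) (out : String) : Decidable (Spec_convert_less_than_thousand number out) := by unfold Spec_convert_less_than_thousand; infer_instance

-- ===== CLAIM (what is proved, stated in full; the proofs are below) =====
def Claim_equal_convert_less_than_thousand : Prop := ∀ (number : Int), Dom_convert_less_than_thousand number → Pre_convert_less_than_thousand number → Spec_convert_less_than_thousand number (convert_less_than_thousand number)

-- ===== LEMMAS AND PROOFS =====

theorem pvStr_eq_of_toList (a b : String) (h : a.toList = b.toList) : a = b :=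
  String.toList_inj.mp h

theorem pvJoin_singleton (a : String) : PySem.Str.join " da " [a] = a := by
  apply pvStr_eq_of_toList
  simp [PySem.Str.toList_join, PySem.Chars.join_singleton]

theorem pvJoin_cons (a b : String) (l : List String) :
    PySem.Str.join " da " (a :: b :: l) = a ++ " da " ++ PySem.Str.join " da " (b :: l) := by
  apply pvStr_eq_of_toList
  simp [PySem.Str.toList_join, PySem.Chars.join_cons_cons]

theorem pvJoin_cons_ne (a : String) (l : List String) (hl : l ≠ []) :
    PySem.Str.join " da " (a :: l) = a ++ " da " ++ PySem.Str.join " da " l := by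
  cases l with
  | nil => exact absurd rfl hl
  | cons b t => exact pvJoin_cons a b t

theorem pvRemParts_ne_nil (r : Int) (h1 : 1 ≤ r) (_h2 : r < 100) : pvRemParts r ≠ [] := by
  unfold pvRemParts
  split_ifs <;> simp_all

-- A on a nonzero remainder 1 ≤ r < 100 computes exactly the join of B's classified parts
theorem pvA_small (r : Int) (h1 : 1 ≤ r) (h2 : r < 100) :
    convert_less_than_thousand r = PySem.Str.join " da " (pvRemParts r) := by
  rw [convert_less_than_thousand]
  unfold pvRemParts
  by_cases hr10 : r < 10
  · simp only [dif_pos hr10]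
    rw [if_neg (show ¬ r ≥ 20 by omega), if_neg (show ¬ r ≥ 10 by omega),
        if_pos (show r ≠ 0 by omega), pvJoin_singleton]
  · by_cases hr20 : r < 20
    · simp only [dif_neg hr10, dif_pos hr20]
      rw [if_neg (show ¬ r ≥ 20 by omega), if_pos (show r ≥ 10 by omega), pvJoin_singleton]
    · simp only [dif_neg hr10, dif_neg hr20, dif_pos h2]
      rw [if_pos (show r ≥ 20 by omega)]
      by_cases ho : PySem.Int.mod r 10 = 0
      · rw [if_pos ho, if_neg (show ¬(PySem.Int.mod r 10 ≠ 0) from not_not_intro ho),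
            List.append_nil, pvJoin_singleton]
      · rw [if_neg ho, if_pos (show PySem.Int.mod r 10 ≠ 0 from ho)]
        simp only [List.singleton_append]
        rw [pvJoin_cons, pvJoin_singleton]

theorem pvMod100 (n : Int) : PySem.Int.mod n 100 = n % 100 :=
  PySem.Int.mod_eq_emod_of_pos (by omega)

theorem pvDiv100 (n : Int) : PySem.Int.floordiv n 100 = n / 100 :=
  PySem.Int.floordiv_eq_ediv_of_pos (by omega)

-- ===== VERDICT (by name: the statement is the Claim_ definition above) =====
theorem convert_less_than_thousand_spec : Claim_equal_convert_less_than_thousand := by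
  intro number _hdom hpre
  obtain ⟨hlo, hhi⟩ := hpre
  unfold Spec_convert_less_than_thousand
  rw [convert_less_than_thousand, convert_less_than_thousand_alt]
  by_cases h1 : number < 10
  · simp only [dif_pos h1, if_pos h1]
  · by_cases h2 : number < 20
    · simp only [dif_neg h1, dif_pos h2, if_neg h1, if_pos h2]
    · simp only [dif_neg h1, dif_neg h2, if_neg h1, if_neg h2]
      by_cases h3 : number < 100
      · -- 20 ≤ number < 100: no hundreds word, the remainder is number itself
        simp only [dif_pos h3, pvMod100, pvDiv100]
        rw [(show number / 100 = 0 by omega), (show number % 100 = number by omega),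
            if_neg (show ¬((0:Int) ≠ 0) by simp), List.nil_append]
        have hA := pvA_small number (by omega) h3
        rw [convert_less_than_thousand] at hA
        simp only [dif_neg h1, dif_neg h2, dif_pos h3] at hA
        exact hA
      · -- 100 ≤ number < 1000
        simp only [dif_neg h3, pvMod100, pvDiv100]
        rw [if_pos (show number / 100 ≠ 0 by omega)]
        by_cases hm0 : number % 100 = 0
        · rw [if_pos hm0, hm0, (show pvRemParts 0 = ([]:List String) from rfl),
              List.append_nil, pvJoin_singleton]
        · have hb1 : (1:Int) ≤ number % 100 := by omega
          have hb2 : number % 100 < 100 := by omega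
          rw [if_neg hm0, pvA_small _ hb1 hb2, List.singleton_append,
              pvJoin_cons_ne _ _ (pvRemParts_ne_nil _ hb1 hb2)]
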